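-- pv_equiv track=rewrite | github.com/Qismeeee/Leetcode | Medium/houseRobberIV.py | canRobKHouses
-- ===== SOURCE A (Python) =====
-- def canRobKHouses(nums, capability, k):
--     """
--     Determines if it's possible to rob at least k houses with the given capability
--     """
--     count = 0
--     i = 0
--
--     while i < len(nums):
--         if nums[i] <= capability:
--             count += 1
--             i += 2
--         else:
--             i += 1
--         if count >= k:
--             return True
--
--     return count >= k
-- ===== SOURCE B (Python) =====
-- def canRobKHouses(nums, capability, k):
--     count = 0
--     run = 0
--     for x in nums:
--         if x <= capability:
--             run += 1
--         else:
--             count += (run + 1) // 2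
--             run = 0
--     count += (run + 1) // 2
--     return count >= k
-- ===== Notes on version B (the rewrite author's own statement) =====
-- stated objective: alternative
-- what changed: Replaces the index-jumping greedy (skip 2 on a robbable house, early return) with a single for-loop that accumulates maximal runs of robbable houses and adds ceil(run/2) per run, comparing the total to k at the end.
import Mathlib
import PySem

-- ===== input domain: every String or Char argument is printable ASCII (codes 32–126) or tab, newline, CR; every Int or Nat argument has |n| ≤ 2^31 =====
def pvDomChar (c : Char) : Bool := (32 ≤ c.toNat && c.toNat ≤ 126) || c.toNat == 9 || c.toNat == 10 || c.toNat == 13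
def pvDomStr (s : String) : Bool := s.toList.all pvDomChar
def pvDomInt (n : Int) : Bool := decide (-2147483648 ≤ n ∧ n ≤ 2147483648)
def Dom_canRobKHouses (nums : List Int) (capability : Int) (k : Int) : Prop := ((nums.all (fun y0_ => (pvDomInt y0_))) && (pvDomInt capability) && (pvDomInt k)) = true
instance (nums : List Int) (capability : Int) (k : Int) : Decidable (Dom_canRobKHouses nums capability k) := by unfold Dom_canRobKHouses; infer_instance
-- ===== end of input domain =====

-- B accumulates maximal runs of robbable houses (ceil(run/2) each) instead of A's skip-by-2 greedy.

-- ===== PORT A =====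
-- the while loop of A, over the suffix of nums starting at index i (i += 2 = drop 1 of the tail)
def goA (cap k : Int) : List Int → Int → Bool
  | [], count => decide (count ≥ k)
  | x :: rest, count =>
    if x ≤ cap then
      if count + 1 ≥ k then true else goA cap k (rest.drop 1) (count + 1)
    else
      if count ≥ k then true else goA cap k rest count
termination_by l => l.length
decreasing_by
  all_goals simp [List.length_drop] <;> omega

def canRobKHouses (nums : List Int) (capability : Int) (k : Int) : Bool :=
  goA capability k nums 0

-- ===== PORT B =====
-- Source B's for loop: state (count, run); flush (run+1)//2 after the loop
def goB (cap : Int) : List Int → Int → Int → Int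
  | [], count, run => count + PySem.Int.floordiv (run + 1) 2
  | x :: rest, count, run =>
    if x ≤ cap then goB cap rest count (run + 1)
    else goB cap rest (count + PySem.Int.floordiv (run + 1) 2) 0

def canRobKHouses_alt (nums : List Int) (capability : Int) (k : Int) : Bool :=
  decide (goB capability nums 0 0 ≥ k)

-- ===== PRECONDITION & SPEC =====
def Spec_canRobKHouses (nums : List Int) (capability : Int) (k : Int) (out : Bool) : Prop := out = canRobKHouses_alt nums capability k
instance (nums : List Int) (capability : Int) (k : Int) (out : Bool) : Decidable (Spec_canRobKHouses nums capability k out) := by unfold Spec_canRobKHouses; infer_instance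

-- ===== CLAIM (what is proved, stated in full; the proofs are below) =====
def Claim_equal_canRobKHouses : Prop := ∀ (nums : List Int) (capability : Int) (k : Int), Dom_canRobKHouses nums capability k → Spec_canRobKHouses nums capability k (canRobKHouses nums capability k)

-- ===== LEMMAS AND PROOFS =====

-- the maximum number of houses A's greedy robs on a suffix (A's count increments, without k)
def mGreedy (cap : Int) : List Int → Int
  | [] => 0
  | x :: rest => if x ≤ cap then 1 + mGreedy cap (rest.drop 1) else mGreedy cap rest
termination_by l => l.length
decreasing_by
  all_goals simp [List.length_drop] <;> omega

theorem mGreedy_nonneg (cap : Int) (l : List Int) : 0 ≤ mGreedy cap l := by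
  induction l using mGreedy.induct cap with
  | case1 => simp [mGreedy]
  | case2 x rest h ih => simp only [mGreedy, h, if_true, List.drop_one] at *; omega
  | case3 x rest h ih => simpa [mGreedy, h] using ih

-- A's loop returns true exactly when the final count reaches k
theorem goA_eq (cap k : Int) (l : List Int) (count : Int) :
    goA cap k l count = decide (count + mGreedy cap l ≥ k) := by
  induction l using mGreedy.induct cap generalizing count with
  | case1 => simp [goA, mGreedy]
  | case2 x rest h ih =>
    have hnn := mGreedy_nonneg cap (rest.drop 1)
    simp only [List.drop_one] at ih hnn
    simp only [goA, mGreedy, h, if_true, List.drop_one, ih]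
    by_cases hk : count + 1 ≥ k <;> simp [hk] <;> omega
  | case3 x rest h ih =>
    have hnn := mGreedy_nonneg cap rest
    simp only [goA, mGreedy, h, if_false, ih]
    by_cases hk : count ≥ k <;> simp [hk] <;> omega

theorem floordiv_succ2 (n : Nat) :
    PySem.Int.floordiv ((n : Int) + 1) 2 = ((n + 1) / 2 : Nat) := by
  rw [show ((n : Int) + 1) = ((n + 1 : Nat) : Int) by push_cast; ring]
  exact_mod_cast PySem.Int.floordiv_natCast (n + 1) 2

-- a run of robbable houses alone yields ceil(len/2)
theorem mGreedy_run (cap : Int) : ∀ (n : Nat) (p : List Int), p.length ≤ n →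
    (∀ y ∈ p, y ≤ cap) → mGreedy cap p = ((p.length + 1) / 2 : Nat) := by
  intro n
  induction n with
  | zero =>
    intro p hlen _
    have : p = [] := List.eq_nil_of_length_eq_zero (Nat.le_zero.mp hlen)
    subst this; simp [mGreedy]
  | succ n ih =>
    intro p hlen hall
    match p with
    | [] => simp [mGreedy]
    | [y] =>
      simp only [mGreedy, hall y (by simp), if_true, List.drop_one, List.tail_cons]
      simp [mGreedy]
    | y :: z :: p' =>
      have h1 : y ≤ cap := hall y (by simp)
      have ihp : mGreedy cap p' = ((p'.length + 1) / 2 : Nat) := by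
        apply ih
        · simpa using Nat.le_of_succ_le_succ (le_trans (by simp) hlen)
        · intro a ha; exact hall a (by simp [ha])
      simp only [mGreedy, h1, if_true, List.drop_one, List.tail_cons, ihp, List.length_cons]
      omega

-- a run of robbable houses followed by a non-robbable separator: ceil(len/2) plus the rest
theorem mGreedy_run_sep (cap x : Int) (hx : ¬ x ≤ cap) : ∀ (n : Nat) (p rest : List Int),
    p.length ≤ n → (∀ y ∈ p, y ≤ cap) →
    mGreedy cap (p ++ x :: rest) = ((p.length + 1) / 2 : Nat) + mGreedy cap rest := by
  intro n
  induction n with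
  | zero =>
    intro p rest hlen _
    have : p = [] := List.eq_nil_of_length_eq_zero (Nat.le_zero.mp hlen)
    subst this; simp [mGreedy, hx]
  | succ n ih =>
    intro p rest hlen hall
    match p with
    | [] => simp [mGreedy, hx]
    | [y] =>
      simp only [List.cons_append, List.nil_append, mGreedy, hall y (by simp), if_true,
        List.drop_one, List.tail_cons]
      norm_num
    | y :: z :: p' =>
      have h1 : y ≤ cap := hall y (by simp)
      have ihp := ih p' rest
        (by simpa using Nat.le_of_succ_le_succ (le_trans (by simp) hlen))
        (fun a ha => hall a (by simp [ha]))
      simp only [List.cons_append, mGreedy, h1, if_true, List.drop_one, List.tail_cons, ihp,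
        List.length_cons]
      omega

-- B's loop with a pending run p (all robbable) computes count + the greedy count of p ++ l
theorem goB_eq (cap : Int) : ∀ (l p : List Int) (count : Int),
    (∀ y ∈ p, y ≤ cap) →
    goB cap l count ((p.length : Int)) = count + mGreedy cap (p ++ l) := by
  intro l
  induction l with
  | nil =>
    intro p count hall
    simp only [goB, List.append_nil]
    rw [mGreedy_run cap p.length p le_rfl hall, floordiv_succ2]
  | cons x rest ih =>
    intro p count hall
    by_cases hx : x ≤ cap
    · have : goB cap (x :: rest) count ((p.length : Int)) =
          goB cap rest count (((p ++ [x]).length : Int)) := by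
        simp [goB, hx]
      rw [this, ih (p ++ [x]) count (by intro y hy; rcases List.mem_append.mp hy with h | h
                                        · exact hall y h
                                        · simp at h; subst h; exact hx)]
      simp
    · have : goB cap (x :: rest) count ((p.length : Int)) =
          goB cap rest (count + PySem.Int.floordiv ((p.length : Int) + 1) 2) ((([] : List Int).length : Int)) := by
        simp [goB, hx]
      rw [this, ih [] _ (by simp)]
      rw [mGreedy_run_sep cap x hx p.length p rest le_rfl hall, floordiv_succ2]
      simp
      ring

-- ===== VERDICT (by name: the statement is the Claim_ definition above) =====
theorem canRobKHouses_spec : Claim_equal_canRobKHouses := by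
  intro nums cap k _
  unfold Spec_canRobKHouses canRobKHouses canRobKHouses_alt
  have h := goB_eq cap nums [] 0 (by simp)
  simp only [List.length_nil, Nat.cast_zero, List.nil_append, zero_add] at h
  rw [goA_eq, h]
  simp
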